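-- pv_equiv track=rewrite | github.com/CPSC440-FALL25/CPU-Design-and-Simulation-Project | operations/twos_complement.py | _dec_add_small
-- ===== SOURCE A (Python) =====
-- def _strip_zeros(s: str) -> str:
--     i, n = 0, len(s)
--     while i < n - 1 and s[i] == '0':
--         i += 1
--     return s[i:]
--
-- _ADD_CARRY = {
--     # carry 0: identity
--     ('0',0):('0',0), ('1',0):('1',0), ('2',0):('2',0), ('3',0):('3',0), ('4',0):('4',0),
--     ('5',0):('5',0), ('6',0):('6',0), ('7',0):('7',0), ('8',0):('8',0), ('9',0):('9',0),
--     # carry 1: increment with wrap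
--     ('0',1):('1',0), ('1',1):('2',0), ('2',1):('3',0), ('3',1):('4',0), ('4',1):('5',0),
--     ('5',1):('6',0), ('6',1):('7',0), ('7',1):('8',0), ('8',1):('9',0), ('9',1):('0',1),
-- }
--
-- def _dec_add_small(dec: str, add_one: int) -> str:
--     """Add 0 or 1 to decimal string using carry table only."""
--     carry = 1 if add_one == 1 else 0
--     out = []
--     for ch in reversed(_strip_zeros(dec)):
--         od, carry = _ADD_CARRY[(ch, carry)]
--         out.append(od)
--     if carry == 1:
--         out.append('1')
--     return _strip_zeros("".join(reversed(out)))
-- ===== SOURCE B (Python) =====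
-- def _dec_add_small(dec: str, add_one: int) -> str:
--     """Add 0 or 1 to decimal string via trailing-nines arithmetic (no digit loop)."""
--     s = dec.lstrip('0')
--     if dec and not s:
--         s = '0'
--     if add_one != 1:
--         return s
--     head = s.rstrip('9')
--     nines = len(s) - len(head)
--     if not head:
--         return '1' + '0' * nines
--     return head[:-1] + chr(ord(head[-1]) + 1) + '0' * nines
-- ===== Notes on version B (the rewrite author's own statement) =====
-- stated objective: simpler
-- what changed: Replaces the reversed per-digit carry-table loop with closed-form string surgery: strip leading zeros, and for +1 strip the trailing '9's, bump the digit before them by one (or prepend '1' if the string was all nines), and append that many '0's.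
import Mathlib
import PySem

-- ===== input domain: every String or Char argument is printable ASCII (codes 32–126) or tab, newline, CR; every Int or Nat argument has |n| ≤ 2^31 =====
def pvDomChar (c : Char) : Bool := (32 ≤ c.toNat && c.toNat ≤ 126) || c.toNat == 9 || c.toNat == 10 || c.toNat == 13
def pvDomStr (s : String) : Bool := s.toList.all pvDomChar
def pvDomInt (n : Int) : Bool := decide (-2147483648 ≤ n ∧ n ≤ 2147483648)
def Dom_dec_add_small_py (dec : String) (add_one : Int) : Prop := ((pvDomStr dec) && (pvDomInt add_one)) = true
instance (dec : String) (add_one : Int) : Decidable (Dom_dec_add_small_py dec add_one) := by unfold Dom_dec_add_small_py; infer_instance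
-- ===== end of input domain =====

-- B replaces A's reversed carry-table digit loop by closed-form trailing-nines string surgery (objective: simpler).

-- ===== PORT A =====
-- _strip_zeros: while i < n-1 and s[i] == '0': i += 1; return s[i:]
def pvStripZeros : List Char → List Char
  | [] => []
  | c :: rest => if rest ≠ [] ∧ c = '0' then pvStripZeros rest else c :: rest

-- the module-level _ADD_CARRY dict, literally
def pvAddCarry : PySem.Dict (Char × Int) (Char × Int) := ⟨[
  (('0',0),('0',0)), (('1',0),('1',0)), (('2',0),('2',0)), (('3',0),('3',0)), (('4',0),('4',0)),
  (('5',0),('5',0)), (('6',0),('6',0)), (('7',0),('7',0)), (('8',0),('8',0)), (('9',0),('9',0)),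
  (('0',1),('1',0)), (('1',1),('2',0)), (('2',1),('3',0)), (('3',1),('4',0)), (('4',1),('5',0)),
  (('5',1),('6',0)), (('6',1),('7',0)), (('7',1),('8',0)), (('8',1),('9',0)), (('9',1),('0',1))]⟩

-- loop body: od, carry = _ADD_CARRY[(ch, carry)]; out.append(od).  none = KeyError (excluded by Pre_)
def pvStep (st : Option (List Char × Int)) (ch : Char) : Option (List Char × Int) :=
  match st with
  | none => none
  | some (out, c) =>
    match PySem.Dict.get? pvAddCarry (ch, c) with
    | some (od, c') => some (out ++ [od], c')
    | none => none

def dec_add_small_py (dec : String) (add_one : Int) : String :=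
  let carry : Int := if add_one == 1 then 1 else 0
  let st := (pvStripZeros dec.toList).reverse.foldl pvStep (some ([], carry))
  match st with
  | none => ""   -- unreachable under Pre_: Python raises KeyError here
  | some (out, c) =>
    let out' := if c == 1 then out ++ ['1'] else out
    String.ofList (pvStripZeros out'.reverse)

-- ===== PORT B =====
def dec_add_small_py_alt (dec : String) (add_one : Int) : String :=
  let s0 := dec.toList.dropWhile (· == '0')                    -- dec.lstrip('0')
  let s := if dec.toList ≠ [] ∧ s0 = [] then ['0'] else s0
  if ¬ (add_one == 1) then String.ofList s
  else
    let head := s.rdropWhile (· == '9')                        -- s.rstrip('9')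
    let nines := s.length - head.length
    if hh : head = [] then String.ofList ('1' :: List.replicate nines '0')
    else String.ofList (head.dropLast ++
      [Char.ofNat ((head.getLast hh).toNat + 1)] ++ List.replicate nines '0')

-- ===== PRECONDITION & SPEC =====
-- Pre_ excludes exactly the inputs on which A raises KeyError (a character that is not a decimal digit).
def Pre_dec_add_small_py (dec : String) (add_one : Int) : Prop :=
  (dec.toList.all (fun c => (['0','1','2','3','4','5','6','7','8','9'] : List Char).contains c)) = true
instance (dec : String) (add_one : Int) : Decidable (Pre_dec_add_small_py dec add_one) := by
  unfold Pre_dec_add_small_py; infer_instance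

def pvWitness_dec_add_small_py : String × Int := ("190", 1)

def Spec_dec_add_small_py (dec : String) (add_one : Int) (out : String) : Prop := out = dec_add_small_py_alt dec add_one
instance (dec : String) (add_one : Int) (out : String) : Decidable (Spec_dec_add_small_py dec add_one out) := by unfold Spec_dec_add_small_py; infer_instance

-- ===== CLAIM (what is proved, stated in full; the proofs are below) =====
def Claim_equal_dec_add_small_py : Prop := ∀ (dec : String) (add_one : Int), Dom_dec_add_small_py dec add_one → Pre_dec_add_small_py dec add_one → Spec_dec_add_small_py dec add_one (dec_add_small_py dec add_one)

-- ===== LEMMAS AND PROOFS =====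

def pvDigits : List Char := ['0','1','2','3','4','5','6','7','8','9']

-- membership in the stripped list
theorem mem_pvStripZeros {c : Char} : ∀ {s : List Char}, c ∈ pvStripZeros s → c ∈ s := by
  intro s
  induction s with
  | nil => simp [pvStripZeros]
  | cons a rest ih =>
    by_cases h : rest ≠ [] ∧ a = '0'
    · simp only [pvStripZeros, if_pos h]
      intro hc; exact List.mem_cons_of_mem _ (ih hc)
    · simp only [pvStripZeros, if_neg h]; exact id

-- shape of the stripped list: empty, or singleton, or nonzero head
theorem pvStripZeros_shape (s : List Char) :
    pvStripZeros s = [] ∨ ∃ h t, pvStripZeros s = h :: t ∧ (t = [] ∨ h ≠ '0') := by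
  induction s with
  | nil => exact Or.inl rfl
  | cons a rest ih =>
    by_cases h : rest ≠ [] ∧ a = '0'
    · simpa only [pvStripZeros, if_pos h] using ih
    · refine Or.inr ⟨a, rest, by simp only [pvStripZeros, if_neg h], ?_⟩
      rw [not_and] at h
      by_cases hr : rest = []
      · exact Or.inl hr
      · exact Or.inr (h hr)

-- stripping a list that is already in stripped shape does nothing
theorem pvStripZeros_of_shape {h : Char} {t : List Char} (hs : t = [] ∨ h ≠ '0') :
    pvStripZeros (h :: t) = h :: t := by
  have : ¬ (t ≠ [] ∧ h = '0') := by
    rcases hs with h1 | h1 <;> simp [h1]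
  simp [pvStripZeros, this]

-- A's helper agrees with B's lstrip('0') + '0' fallback
theorem pvStripZeros_eq_dropWhile (s : List Char) :
    pvStripZeros s =
      if s ≠ [] ∧ s.dropWhile (· == '0') = [] then ['0'] else s.dropWhile (· == '0') := by
  induction s with
  | nil => simp [pvStripZeros]
  | cons a rest ih =>
    by_cases ha : a = '0'
    · subst ha
      by_cases hr : rest = []
      · subst hr; simp [pvStripZeros]
      · have hcond : rest ≠ [] ∧ ('0' : Char) = '0' := ⟨hr, rfl⟩
        rw [show pvStripZeros (('0' : Char) :: rest) = pvStripZeros rest from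
          if_pos hcond, ih]
        have hdw : (('0' : Char) :: rest).dropWhile (· == '0') = rest.dropWhile (· == '0') := by
          simp
        rw [hdw]
        by_cases h2 : rest.dropWhile (· == '0') = [] <;> simp [h2, hr]
    · have hcond : ¬ (rest ≠ [] ∧ a = '0') := by simp [ha]
      have hdw : (a :: rest).dropWhile (· == '0') = a :: rest := by
        simp [ha]
      simp [pvStripZeros, hcond, hdw]

-- table lookups
theorem table_carry0 : ∀ ch ∈ pvDigits, PySem.Dict.get? pvAddCarry (ch, 0) = some (ch, 0) := by
  intro ch h; fin_cases h <;> rfl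
theorem table_carry1 : ∀ ch ∈ pvDigits, ch ≠ '9' →
    PySem.Dict.get? pvAddCarry (ch, 1) = some (Char.ofNat (ch.toNat + 1), 0) := by
  intro ch h hne; fin_cases h
  · rfl
  · rfl
  · rfl
  · rfl
  · rfl
  · rfl
  · rfl
  · rfl
  · rfl
  · exact absurd rfl hne
theorem table_nine : PySem.Dict.get? pvAddCarry ('9', 1) = some ('0', 1) := by rfl
theorem succ_ne_zero_char : ∀ ch ∈ pvDigits, ch ≠ '9' → Char.ofNat (ch.toNat + 1) ≠ '0' := by
  intro ch h hne; fin_cases h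
  · decide
  · decide
  · decide
  · decide
  · decide
  · decide
  · decide
  · decide
  · decide
  · exact absurd rfl hne

-- the loop with carry 0 copies its input
theorem loop_carry0 (r : List Char) (hr : ∀ c ∈ r, c ∈ pvDigits) (acc : List Char) :
    r.foldl pvStep (some (acc, 0)) = some (acc ++ r, 0) := by
  induction r generalizing acc with
  | nil => simp
  | cons a rest ih =>
    have ha : a ∈ pvDigits := hr a List.mem_cons_self
    have hstep : pvStep (some (acc, 0)) a = some (acc ++ [a], 0) := by
      simp [pvStep, table_carry0 a ha]
    rw [List.foldl_cons, hstep, ih (fun c hc => hr c (List.mem_cons_of_mem _ hc))]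
    simp

-- the loop over k nines with carry 1 writes k zeros and keeps the carry
theorem loop_nines (k : Nat) (acc : List Char) :
    (List.replicate k '9').foldl pvStep (some (acc, 1)) = some (acc ++ List.replicate k '0', 1) := by
  induction k generalizing acc with
  | zero => simp
  | succ k ih =>
    have hstep : pvStep (some (acc, 1)) '9' = some (acc ++ ['0'], 1) := by
      simp [pvStep, table_nine]
    rw [List.replicate_succ, List.foldl_cons, hstep, ih]
    simp [List.replicate_succ]

-- decomposition by trailing nines
theorem rdrop_nines (s : List Char) :
    s = s.rdropWhile (· == '9') ++ List.replicate (s.length - (s.rdropWhile (· == '9')).length) '9' := by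
  simp only [List.rdropWhile]
  have hsplit : (s.reverse.dropWhile (· == '9')).reverse ++ (s.reverse.takeWhile (· == '9')).reverse = s := by
    rw [← List.reverse_append, List.takeWhile_append_dropWhile, List.reverse_reverse]
  have hrep : (s.reverse.takeWhile (· == '9')).reverse
      = List.replicate (s.reverse.takeWhile (· == '9')).reverse.length '9' := by
    apply List.eq_replicate_of_mem
    intro b hb
    rw [List.mem_reverse] at hb
    have := List.mem_takeWhile_imp hb
    simpa using this
  have hlen : (s.reverse.takeWhile (· == '9')).reverse.length
      = s.length - (s.reverse.dropWhile (· == '9')).reverse.length := by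
    have := congrArg List.length hsplit
    simp only [List.length_append] at this
    omega
  conv_lhs => rw [← hsplit]
  rw [hrep, hlen]

-- ===== VERDICT (by name: the statement is the Claim_ definition above) =====

-- the already-stripped list is a fixed point of the helper
theorem pvStripZeros_idem (s : List Char) :
    pvStripZeros (pvStripZeros s) = pvStripZeros s := by
  rcases pvStripZeros_shape s with h | ⟨h, tl, heq, hsh⟩
  · rw [h]; rfl
  · rw [heq]; exact pvStripZeros_of_shape hsh

theorem dec_add_small_py_spec : Claim_equal_dec_add_small_py := by
  intro dec add_one _hdom hpre
  unfold Spec_dec_add_small_py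
  simp only [dec_add_small_py, dec_add_small_py_alt]
  simp only [Pre_dec_add_small_py] at hpre
  have hd : ∀ c ∈ dec.toList, c ∈ pvDigits := by
    intro c hc
    have := List.all_eq_true.mp hpre c hc
    simpa [pvDigits] using this
  have ht : ∀ c ∈ pvStripZeros dec.toList, c ∈ pvDigits :=
    fun c hc => hd c (mem_pvStripZeros hc)
  rw [← pvStripZeros_eq_dropWhile]
  by_cases h1 : add_one = 1
  · -- carry = 1
    have hb1 : (add_one == 1) = true := by simp [h1]
    simp only [hb1, if_true]
    set t := pvStripZeros dec.toList with htdef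
    set head := t.rdropWhile (· == '9') with hheaddef
    set k := t.length - head.length with hkdef
    have hdec : t = head ++ List.replicate k '9' := rdrop_nines t
    have hrev : t.reverse = List.replicate k '9' ++ head.reverse := by
      rw [hdec, List.reverse_append, List.reverse_replicate]
    by_cases hh : head = []
    · have hfold : t.reverse.foldl pvStep (some ([], 1)) = some (List.replicate k '0', 1) := by
        rw [hrev, hh]
        simpa using loop_nines k []
      rw [hfold]
      simp only [hh, dite_true]
      show String.ofList (pvStripZeros (List.replicate k '0' ++ ['1']).reverse)
          = String.ofList ('1' :: List.replicate k '0')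
      rw [List.reverse_append, List.reverse_replicate]
      show String.ofList (pvStripZeros ('1' :: List.replicate k '0')) = _
      rw [pvStripZeros_of_shape (Or.inr (by decide))]
    · have hdmem : head.getLast hh ∈ pvDigits := by
        apply ht
        rw [hdec]
        exact List.mem_append_left _ (List.getLast_mem hh)
      have hd9 : head.getLast hh ≠ '9' := by
        have := List.rdropWhile_last_not (· == '9') t hh
        simpa using this
      have hrevh : head.reverse = head.getLast hh :: head.dropLast.reverse := by
        conv_lhs => rw [← List.dropLast_append_getLast hh]
        rw [List.reverse_append]
        rfl
      have hfold : t.reverse.foldl pvStep (some ([], 1))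
          = some (List.replicate k '0' ++ [Char.ofNat ((head.getLast hh).toNat + 1)]
                   ++ head.dropLast.reverse, 0) := by
        rw [hrev, List.foldl_append]
        have h1' : (List.replicate k '9').foldl pvStep (some ([], 1))
            = some (List.replicate k '0', 1) := by simpa using loop_nines k []
        rw [h1', hrevh, List.foldl_cons]
        have hstep : pvStep (some (List.replicate k '0', 1)) (head.getLast hh)
            = some (List.replicate k '0' ++ [Char.ofNat ((head.getLast hh).toNat + 1)], 0) := by
          simp [pvStep, table_carry1 _ hdmem hd9]
        rw [hstep]
        have hdig : ∀ c ∈ head.dropLast.reverse, c ∈ pvDigits := by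
          intro c hc
          apply ht
          rw [hdec]
          exact List.mem_append_left _ (List.dropLast_subset _ (by simpa using hc))
        rw [loop_carry0 _ hdig]
      rw [hfold]
      simp only [hh, dite_false]
      show String.ofList (pvStripZeros ((List.replicate k '0'
            ++ [Char.ofNat ((head.getLast hh).toNat + 1)] ++ head.dropLast.reverse)).reverse)
          = String.ofList (head.dropLast ++ [Char.ofNat ((head.getLast hh).toNat + 1)]
            ++ List.replicate k '0')
      rw [List.reverse_append, List.reverse_append, List.reverse_reverse,
        List.reverse_replicate, List.reverse_singleton, List.append_assoc]
      by_cases hd0 : head.dropLast = []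
      · rw [hd0]
        show String.ofList (pvStripZeros (Char.ofNat ((head.getLast hh).toNat + 1)
            :: List.replicate k '0')) = _
        rw [pvStripZeros_of_shape (Or.inr (succ_ne_zero_char _ hdmem hd9))]
        simp
      · obtain ⟨e, h'', he⟩ := List.exists_cons_of_ne_nil hd0
        have hshape : t = e :: (h'' ++ [head.getLast hh] ++ List.replicate k '9') := by
          rw [hdec]
          conv_lhs => rw [← List.dropLast_append_getLast hh, he]
          simp
        have he0 : e ≠ '0' := by
          rcases pvStripZeros_shape dec.toList with hnil | ⟨H, TL, heq, hsh⟩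
          · rw [← htdef] at hnil
            rw [hnil] at hshape
            exact absurd hshape.symm (by simp)
          · rw [← htdef] at heq
            rw [heq] at hshape
            obtain ⟨rfl, rfl⟩ : H = e ∧ TL = h'' ++ [head.getLast hh] ++ List.replicate k '9' := by
              exact ⟨(List.cons.injEq _ _ _ _ ▸ hshape).1, (List.cons.injEq _ _ _ _ ▸ hshape).2⟩
            rcases hsh with h | h
            · exact absurd h (by simp)
            · exact h
        rw [he]
        show String.ofList (pvStripZeros (e :: (h'' ++ ([Char.ofNat ((head.getLast hh).toNat + 1)]
            ++ List.replicate k '0')))) = _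
        rw [pvStripZeros_of_shape (Or.inr he0)]
        simp
  · -- carry = 0
    have hb1 : (add_one == 1) = false := by simp [h1]
    simp only [hb1, Bool.false_eq_true, if_false, not_false_eq_true, if_true]
    have hfold : (pvStripZeros dec.toList).reverse.foldl pvStep (some ([], 0))
        = some ((pvStripZeros dec.toList).reverse, 0) := by
      have := loop_carry0 (pvStripZeros dec.toList).reverse
        (fun c hc => ht c (List.mem_reverse.mp hc)) []
      simpa using this
    rw [hfold]
    show String.ofList (pvStripZeros (pvStripZeros dec.toList).reverse.reverse)
        = String.ofList (pvStripZeros dec.toList)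
    rw [List.reverse_reverse, pvStripZeros_idem]
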